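-- pv_equiv track=rewrite | github.com/joowop/Algorithm | 프로그래머스/lv1/12903. 가운데 글자 가져오기/가운데 글자 가져오기.py | solution
-- ===== SOURCE A (Python) =====
-- def solution(s):
--     answer = ''
--     a = [i for i in s]
--     if (len(a)%2) == 0:
--         answer = ''.join(a[int(len(a)/2)-1:int(len(a)/2)+1])
--     elif (len(a)%2) == 1:
--         answer = a[int(len(a)/2)]
--     return answer
-- ===== SOURCE B (Python) =====
-- def solution(s):
--     while len(s) > 2:
--         s = s[1:-1]
--     return s
-- ===== Notes on version B (the rewrite author's own statement) =====
-- stated objective: alternative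
-- what changed: Instead of computing the middle index arithmetically and branching on parity, B repeatedly strips one character from each end (s = s[1:-1]) until at most two characters remain; no index arithmetic, no parity branch, no list build.
import Mathlib
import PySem

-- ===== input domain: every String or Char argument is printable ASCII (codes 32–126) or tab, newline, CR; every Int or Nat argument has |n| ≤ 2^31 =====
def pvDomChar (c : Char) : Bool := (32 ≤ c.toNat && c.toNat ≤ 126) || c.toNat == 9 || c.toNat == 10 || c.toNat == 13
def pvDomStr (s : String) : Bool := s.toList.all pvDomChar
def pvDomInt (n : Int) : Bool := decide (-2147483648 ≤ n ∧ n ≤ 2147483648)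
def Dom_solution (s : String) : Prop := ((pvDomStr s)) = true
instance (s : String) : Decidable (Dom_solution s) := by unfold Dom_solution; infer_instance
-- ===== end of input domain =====

-- B replaces A's index arithmetic, parity branch and list build by repeatedly
-- stripping one character from each end until at most two remain (objective: alternative).

-- ===== PORT A =====
-- int(len(a)/2) is exact floor division on nonnegative lengths, ported as Int ediv by 2.
def solution (s : String) : String :=
  let a : List Char := s.toList
  if (a.length % 2) == 0 then
    String.mk (PySem.List.slice a (some ((a.length : Int) / 2 - 1)) (some ((a.length : Int) / 2 + 1)))
  else
    -- a[int(len(a)/2)]: the index is always in range when the length is odd, so pyGetD is exact here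
    String.mk [PySem.List.pyGetD a ((a.length : Int) / 2) ' ']

-- ===== PORT B =====
-- 'while len(s) > 2: s = s[1:-1]' as recursion on the (strictly shrinking) string
def peelMid (a : List Char) : List Char :=
  if a.length ≤ 2 then a
  else peelMid (PySem.List.slice a (some 1) (some (-1)))
termination_by a.length
decreasing_by
  simp only [PySem.List.length_slice, PySem.List.clampIdx_neg_one]
  omega

def solution_alt (s : String) : String := String.mk (peelMid s.toList)

-- ===== PRECONDITION & SPEC =====
def Spec_solution (s : String) (out : String) : Prop := out = solution_alt s
instance (s : String) (out : String) : Decidable (Spec_solution s out) := by unfold Spec_solution; infer_instance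

-- ===== CLAIM (what is proved, stated in full; the proofs are below) =====
def Claim_equal_solution : Prop := ∀ (s : String), Dom_solution s → Spec_solution s (solution s)

-- ===== LEMMAS AND PROOFS =====

-- the common middle: drop (n-1)/2 then take (n/2+1 - (n-1)/2), Nat arithmetic
def midL (a : List Char) : List Char :=
  (a.drop ((a.length - 1) / 2)).take (a.length / 2 + 1 - (a.length - 1) / 2)

theorem slice_one_neg_one (a : List Char) (h : 2 < a.length) :
    PySem.List.slice a (some 1) (some (-1)) = (a.drop 1).take (a.length - 2) := by
  simp [PySem.List.slice]
  rw [min_eq_left (by omega), List.drop_one]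
  congr 1

theorem peelMid_eq_midL (a : List Char) : peelMid a = midL a := by
  induction a using peelMid.induct with
  | case1 a h =>
    rw [peelMid, if_pos h]
    unfold midL
    have h0 : (a.length - 1) / 2 = 0 := by omega
    rw [h0, List.drop_zero, List.take_of_length_le (by omega)]
  | case2 a h ih =>
    rw [peelMid, if_neg h, ih]
    have h3 : 2 < a.length := by omega
    rw [slice_one_neg_one a h3]
    unfold midL
    set n := a.length with hn
    have hlen : ((a.drop 1).take (n - 2)).length = n - 2 := by
      simp [hn]; omega
    rw [hlen, List.drop_take, List.take_take, List.drop_drop]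
    have e1 : 1 + (n - 2 - 1) / 2 = (n - 1) / 2 := by omega
    have e2 : min ((n - 2) / 2 + 1 - (n - 2 - 1) / 2) (n - 2 - (n - 2 - 1) / 2)
        = n / 2 + 1 - (n - 1) / 2 := by omega
    rw [e1, e2]

theorem solution_eq (s : String) : solution s = solution_alt s := by
  unfold solution solution_alt
  rw [peelMid_eq_midL]
  dsimp only
  set a : List Char := s.toList with ha
  unfold midL
  by_cases hpar : a.length % 2 = 0
  · -- even length
    by_cases h0 : a.length = 0
    · have ha0 : a = [] := List.length_eq_zero_iff.mp h0
      simp only [ha0]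
      simp [PySem.List.slice]
    have hne : a.length ≠ 0 := h0
    have hs : (a.length : Int) / 2 - 1 = (((a.length - 1) / 2 : Nat) : Int) := by omega
    have he : (a.length : Int) / 2 + 1 = ((a.length / 2 + 1 : Nat) : Int) := by omega
    simp only [hpar, beq_self_eq_true, if_true, hs, he]
    rw [PySem.List.slice_natCast]
  · -- odd length: the single middle character
    have hlt : a.length / 2 < a.length := by omega
    have hmid : (a.length : Int) / 2 = ((a.length / 2 : Nat) : Int) := by omega
    simp only [hpar, beq_iff_eq, if_false, hmid]
    rw [PySem.List.pyGetD_natCast]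
    have h1 : (a.length - 1) / 2 = a.length / 2 := by omega
    have h2 : a.length / 2 + 1 - a.length / 2 = 1 := by omega
    rw [h1, h2, List.drop_eq_getElem_cons hlt]
    rw [List.take_succ_cons, List.take_zero, List.getD_eq_getElem a ' ' hlt]

-- ===== VERDICT (by name: the statement is the Claim_ definition above) =====
theorem solution_spec : Claim_equal_solution := by
  intro s _
  exact solution_eq s
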